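-- pv_equiv track=rewrite | github.com/Seaniok/prg-basics-UEK | 04-Functions/7-15.py | f
-- ===== SOURCE A (Python) =====
-- def f(detector):
--     count = 0
--     detector = str(detector)
--     for char in detector:
--         if char == '+':
--             count = count + 1
--         if char == '-':
--             count = count - 1
--         if count == 3:
--             return True
--     return False
-- ===== SOURCE B (Python) =====
-- def f(detector):
--     s = str(detector)
--
--     def step(c):
--         return 1 if c == '+' else -1 if c == '-' else 0
--
--     def rec(seg):
--         # returns (total step sum of seg, max prefix sum of seg incl. empty prefix)
--         if len(seg) <= 1:
--             d = step(seg[0]) if seg else 0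
--             return (d, max(0, d))
--         mid = len(seg) // 2
--         t1, m1 = rec(seg[:mid])
--         t2, m2 = rec(seg[mid:])
--         return (t1 + t2, max(m1, t1 + m2))
--
--     return rec(s)[1] >= 3
-- ===== Notes on version B (the rewrite author's own statement) =====
-- stated objective: alternative
-- what changed: B replaces A's stateful early-exit counter loop by a divide-and-conquer that recursively combines (segment total, max prefix sum) pairs over string halves and returns whether the max prefix sum is >= 3 (valid since steps are within +/-1, so the running count reaches exactly 3 iff the max prefix sum is >= 3).
import Mathlib
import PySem

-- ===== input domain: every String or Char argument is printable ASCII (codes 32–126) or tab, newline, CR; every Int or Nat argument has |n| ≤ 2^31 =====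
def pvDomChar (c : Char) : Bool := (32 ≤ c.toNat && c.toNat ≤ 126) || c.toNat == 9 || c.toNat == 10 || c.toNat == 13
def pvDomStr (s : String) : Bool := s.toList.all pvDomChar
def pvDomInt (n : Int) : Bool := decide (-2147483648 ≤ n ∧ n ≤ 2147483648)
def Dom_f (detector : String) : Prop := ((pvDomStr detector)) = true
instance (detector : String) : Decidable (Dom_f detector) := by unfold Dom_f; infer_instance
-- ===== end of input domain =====

-- header: B is a divide-and-conquer computing (total, max prefix sum) over halves and testing max prefix sum ≥ 3, instead of A's early-exit counter loop (objective: alternative).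

-- ===== PORT A =====
def fGo : List Char → Int → Bool
  | [], _ => false
  | c :: rest, count =>
    let count := if c = '+' then count + 1 else count
    let count := if c = '-' then count - 1 else count
    if count = 3 then true else fGo rest count

def f (detector : String) : Bool := fGo detector.toList 0

-- ===== PORT B =====
def fStep (c : Char) : Int := if c = '+' then 1 else if c = '-' then -1 else 0

-- rec in Source B: (total step sum, max prefix sum incl. empty) of a segment, combined over
-- halves; fuel (= initial length) only makes the recursion structural, never reached 0 on live calls
def fRec : Nat → List Char → Int × Int
  | _, [] => (0, 0)
  | _, [c] => (fStep c, max 0 (fStep c))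
  | Nat.succ fuel, c1 :: c2 :: rest =>
    let seg := c1 :: c2 :: rest
    let mid := seg.length / 2
    let p1 := fRec fuel (seg.take mid)
    let p2 := fRec fuel (seg.drop mid)
    (p1.1 + p2.1, max p1.2 (p1.1 + p2.2))
  | 0, _ :: _ :: _ => (0, 0)

def f_alt (detector : String) : Bool := decide ((fRec detector.toList.length detector.toList).2 ≥ 3)

-- ===== PRECONDITION & SPEC =====
def Spec_f (detector : String) (out : Bool) : Prop := out = f_alt detector
instance (detector : String) (out : Bool) : Decidable (Spec_f detector out) := by unfold Spec_f; infer_instance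

-- ===== CLAIM (what is proved, stated in full; the proofs are below) =====
def Claim_equal_f : Prop := ∀ (detector : String), Dom_f detector → Spec_f detector (f detector)

-- ===== LEMMAS AND PROOFS =====
-- total step sum of a segment
def fT (l : List Char) : Int := (l.map fStep).sum
-- max prefix sum (including the empty prefix) of a segment
def fM : List Char → Int
  | [] => 0
  | c :: cs => max 0 (fStep c + fM cs)

theorem fM_nonneg (l : List Char) : 0 ≤ fM l := by
  cases l <;> simp [fM]

theorem fT_append (l1 l2 : List Char) : fT (l1 ++ l2) = fT l1 + fT l2 := by
  simp [fT]

theorem fM_append (l1 l2 : List Char) :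
    fM (l1 ++ l2) = max (fM l1) (fT l1 + fM l2) := by
  induction l1 with
  | nil => have := fM_nonneg l2; simp [fM, fT]; omega
  | cons c cs ih =>
    simp only [List.cons_append, fM, ih, fT, List.map_cons, List.sum_cons]
    omega

theorem fRec_eq (fuel : Nat) (l : List Char) (h : l.length ≤ fuel + 1) :
    fRec fuel l = (fT l, fM l) := by
  induction fuel generalizing l with
  | zero =>
    match l, h with
    | [], _ => simp [fRec, fT, fM]
    | [c], _ => simp [fRec, fT, fM]
  | succ n ih =>
    match l with
    | [] => simp [fRec, fT, fM]
    | [c] => simp [fRec, fT, fM]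
    | c1 :: c2 :: rest =>
      have hlen : rest.length + 2 ≤ n + 2 := by simpa using h
      simp only [fRec]
      rw [ih _ (by simp [List.length_take]; omega),
          ih _ (by simp [List.length_drop]; omega)]
      rw [show (fT (c1 :: c2 :: rest), fM (c1 :: c2 :: rest))
            = (fT (List.take ((c1 :: c2 :: rest).length / 2) (c1 :: c2 :: rest) ++
                   List.drop ((c1 :: c2 :: rest).length / 2) (c1 :: c2 :: rest)),
               fM (List.take ((c1 :: c2 :: rest).length / 2) (c1 :: c2 :: rest) ++
                   List.drop ((c1 :: c2 :: rest).length / 2) (c1 :: c2 :: rest))) by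
            rw [List.take_append_drop]]
      rw [fT_append, fM_append]

theorem fGo_eq (cs : List Char) (count : Int) (h : count < 3) :
    fGo cs count = decide (3 ≤ count + fM cs) := by
  induction cs generalizing count with
  | nil => simp [fGo, fM]; omega
  | cons c rest ih =>
    simp only [fGo]
    rw [show (if c = '-' then (if c = '+' then count + 1 else count) - 1
        else (if c = '+' then count + 1 else count)) = count + fStep c by
      unfold fStep; split_ifs <;> first | omega | simp_all]
    have hM := fM_nonneg rest
    by_cases h3 : count + fStep c = 3
    · rw [if_pos h3]
      have : (3 : Int) ≤ count + fM (c :: rest) := by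
        simp only [fM]; omega
      simp [this]
    · have hlt : count + fStep c < 3 := by
        have : fStep c ≤ 1 := by unfold fStep; split_ifs <;> omega
        omega
      rw [if_neg h3, ih _ hlt]
      simp only [fM]
      by_cases hc : (3 : Int) ≤ count + fStep c + fM rest
      · have : (3 : Int) ≤ count + max 0 (fStep c + fM rest) := by omega
        simp [hc, this]
      · have : ¬ (3 : Int) ≤ count + max 0 (fStep c + fM rest) := by omega
        simp [hc, this]

-- ===== VERDICT (by name: the statement is the Claim_ definition above) =====
theorem f_spec : Claim_equal_f := by
  intro d _
  unfold Spec_f f f_alt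
  rw [fRec_eq _ _ (by omega), fGo_eq _ _ (by omega)]
  simp
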